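-- pv_equiv track=rewrite | github.com/TheZolakaya/nirmanakaya-reader | proofs/forty_fold_seal_proof.py | check_toroidal_2x2
-- ===== SOURCE A (Python) =====
-- TARGET_SUM = 40
--
-- def check_toroidal_2x2(grid):
--     """Level 3: Check all 16 toroidal 2x2 blocks sum to 40"""
--     for i in range(4):
--         for j in range(4):
--             block_sum = (grid[i][j] + grid[i][(j+1)%4] +
--                         grid[(i+1)%4][j] + grid[(i+1)%4][(j+1)%4])
--             if block_sum != TARGET_SUM:
--                 return False
--     return True
-- ===== SOURCE B (Python) =====
-- TARGET_SUM = 40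
--
-- def check_toroidal_2x2(grid):
--     # Algebraic characterization: with v(i,j) = grid[i][j] + grid[(i+1)%4][j],
--     # all four block sums v(i,j)+v(i,(j+1)%4) in block-row i equal 40
--     # iff v(i,0)+v(i,1) == 40 and the pair sums alternate: v(i,2)==v(i,0), v(i,3)==v(i,1).
--     # So 12 checks suffice instead of enumerating the 16 blocks.
--     for i in range(4):
--         k = (i + 1) % 4
--         v0 = grid[i][0] + grid[k][0]
--         v1 = grid[i][1] + grid[k][1]
--         if v0 + v1 != TARGET_SUM:
--             return False
--         if grid[i][2] + grid[k][2] != v0: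
--             return False
--         if grid[i][3] + grid[k][3] != v1:
--             return False
--     return True
-- ===== Notes on version B (the rewrite author's own statement) =====
-- stated objective: alternative
-- what changed: B does not enumerate the 16 toroidal 2x2 blocks: it uses the algebraic characterization that all block sums in block-row i equal 40 iff v(i,0)+v(i,1)==40 and the vertical pair sums alternate (v(i,2)==v(i,0), v(i,3)==v(i,1)), so it performs 12 equality checks on pair sums instead of 16 block-sum comparisons.
-- outside the precondition, e.g. on check_toroidal_2x2([[10, 10, 0], [10, 10, 0]]): A returns False, B returns False; on check_toroidal_2x2([[10, 10], [10, 10]]): A raises IndexError, B raises IndexError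
import Mathlib
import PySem

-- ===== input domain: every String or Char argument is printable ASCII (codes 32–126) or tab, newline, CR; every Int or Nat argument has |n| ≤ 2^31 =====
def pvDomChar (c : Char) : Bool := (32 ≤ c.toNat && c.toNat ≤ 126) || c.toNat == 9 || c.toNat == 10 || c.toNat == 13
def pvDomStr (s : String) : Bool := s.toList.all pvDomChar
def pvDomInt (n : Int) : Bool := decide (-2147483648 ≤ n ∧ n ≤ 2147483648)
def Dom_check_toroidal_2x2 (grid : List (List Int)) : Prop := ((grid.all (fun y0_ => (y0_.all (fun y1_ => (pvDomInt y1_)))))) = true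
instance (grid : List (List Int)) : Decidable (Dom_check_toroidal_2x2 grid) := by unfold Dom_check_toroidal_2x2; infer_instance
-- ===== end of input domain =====

-- B replaces A's enumeration of the 16 toroidal blocks by an algebraic characterization:
-- per block-row i it checks v(i,0)+v(i,1)=40 and the alternation v(i,2)=v(i,0), v(i,3)=v(i,1)
-- of the vertical pair sums (objective: alternative algorithm); return-value equivalence on Pre_.

-- ===== PORT A =====
-- grid[i][j]; where Python would raise IndexError the port uses a default; Pre_ below excludes
-- exactly the inputs where the Pythons raise (or where the early exit makes the value accidental)
def pvGetA (grid : List (List Int)) (i j : Int) : Int :=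
  PySem.List.pyGetD (PySem.List.pyGetD grid i []) j 0

-- inner 'for j in range(4)' with the early 'return False'
def pvRowA (grid : List (List Int)) (i : Int) : List Int → Bool
  | [] => true
  | j :: js =>
    let block_sum := pvGetA grid i j + pvGetA grid i (PySem.Int.mod (j+1) 4) +
      pvGetA grid (PySem.Int.mod (i+1) 4) j +
      pvGetA grid (PySem.Int.mod (i+1) 4) (PySem.Int.mod (j+1) 4)
    if block_sum ≠ 40 then false else pvRowA grid i js

-- outer 'for i in range(4)', propagating the early return
def pvRowsA (grid : List (List Int)) : List Int → Bool
  | [] => true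
  | i :: is => if pvRowA grid i (PySem.List.pyRange 0 4 1) then pvRowsA grid is else false

def check_toroidal_2x2 (grid : List (List Int)) : Bool :=
  pvRowsA grid (PySem.List.pyRange 0 4 1)

-- ===== PORT B =====
def pvGetB (grid : List (List Int)) (i j : Int) : Int :=
  PySem.List.pyGetD (PySem.List.pyGetD grid i []) j 0

-- body of B's 'for i in range(4)': the three checks of block-row i
def pvRowB (grid : List (List Int)) (i : Int) : Bool :=
  let k := PySem.Int.mod (i+1) 4
  let v0 := pvGetB grid i 0 + pvGetB grid k 0
  let v1 := pvGetB grid i 1 + pvGetB grid k 1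
  if v0 + v1 ≠ 40 then false
  else if pvGetB grid i 2 + pvGetB grid k 2 ≠ v0 then false
  else if pvGetB grid i 3 + pvGetB grid k 3 ≠ v1 then false
  else true

def pvRowsB (grid : List (List Int)) : List Int → Bool
  | [] => true
  | i :: is => if pvRowB grid i then pvRowsB grid is else false

def check_toroidal_2x2_alt (grid : List (List Int)) : Bool :=
  pvRowsB grid (PySem.List.pyRange 0 4 1)

-- ===== PRECONDITION & SPEC =====
-- Pre_ admits the grids on which A surely returns: fully well-formed grids (>= 4 rows, first four
-- rows of length >= 4), or grids whose top-left 2x2 block exists and already mismatches (both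
-- Pythons return False there before reading anything else). It excludes malformed grids on which
-- A raises IndexError, and malformed grids that survive the first block, where whether A returns
-- False or raises depends on where in its scan order the first mismatch lies — an artefact of the
-- early exit (B reads the same first four cells before its first test, then differs in scan order).
def Pre_check_toroidal_2x2 (grid : List (List Int)) : Prop :=
  (4 ≤ grid.length ∧ (grid.take 4).all (fun r => decide (4 ≤ r.length)) = true) ∨
  (2 ≤ grid.length ∧ 2 ≤ (grid.getD 0 []).length ∧ 2 ≤ (grid.getD 1 []).length ∧
    (grid.getD 0 []).getD 0 0 + (grid.getD 0 []).getD 1 0 +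
      (grid.getD 1 []).getD 0 0 + (grid.getD 1 []).getD 1 0 ≠ 40)
instance (grid : List (List Int)) : Decidable (Pre_check_toroidal_2x2 grid) := by
  unfold Pre_check_toroidal_2x2; infer_instance
def pvWitness_check_toroidal_2x2 : List (List Int) :=
  [[10,10,10,10],[10,10,10,10],[10,10,10,10],[10,10,10,10]]

def Spec_check_toroidal_2x2 (grid : List (List Int)) (out : Bool) : Prop := out = check_toroidal_2x2_alt grid
instance (grid : List (List Int)) (out : Bool) : Decidable (Spec_check_toroidal_2x2 grid out) := by unfold Spec_check_toroidal_2x2; infer_instance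

-- ===== CLAIM (what is proved, stated in full; the proofs are below) =====
def Claim_equal_check_toroidal_2x2 : Prop := ∀ (grid : List (List Int)), Dom_check_toroidal_2x2 grid → Pre_check_toroidal_2x2 grid → Spec_check_toroidal_2x2 grid (check_toroidal_2x2 grid)

-- ===== LEMMAS AND PROOFS =====

-- ===== VERDICT (by name: the statement is the Claim_ definition above) =====
theorem check_toroidal_2x2_spec : Claim_equal_check_toroidal_2x2 := by
  intro grid _ _
  unfold Spec_check_toroidal_2x2 check_toroidal_2x2 check_toroidal_2x2_alt
  have hr : PySem.List.pyRange 0 4 1 = [0,1,2,3] := by decide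
  rw [hr]
  simp only [pvRowsA, pvRowA, pvRowsB, pvRowB, hr]
  norm_num [PySem.Int.mod]
  have h1 : Int.fmod 1 4 = 1 := by decide
  have h2 : Int.fmod 2 4 = 2 := by decide
  have h3 : Int.fmod 3 4 = 3 := by decide
  simp only [h1, h2, h3, pvGetA, pvGetB]
  simp [PySem.List.pyGetD_ofNat']
  rw [Bool.eq_iff_iff]
  simp only [Bool.and_eq_true, decide_eq_true_eq]
  omega
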